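-- pv_equiv track=rewrite | github.com/jennykarim45-ai/Music_Talent_Radar | spotify_scraper_v2.py | est_genre_exclu
-- ===== SOURCE A (Python) =====
-- GENRES_EXCLUS = [
--     'classical', 'orchestra', 'symphonic', 'chamber', 'opera',
--     'children', 'kids', 'baby', 'nursery',
--     'christmas', 'holiday', 'noel',
--     'compilation', 'soundtrack', 'anime', 'gaming'
-- ]
--
-- def est_genre_exclu(genres_list):
--     if not genres_list:
--         return False
--     genres_str = ' '.join(genres_list).lower()
--     for genre_exclu in GENRES_EXCLUS:
--         if genre_exclu in genres_str:
--             return True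
--     return False
-- ===== SOURCE B (Python) =====
-- GENRES_EXCLUS = [
--     'classical', 'orchestra', 'symphonic', 'chamber', 'opera',
--     'children', 'kids', 'baby', 'nursery',
--     'christmas', 'holiday', 'noel',
--     'compilation', 'soundtrack', 'anime', 'gaming'
-- ]
--
-- def est_genre_exclu(genres_list):
--     # Per-element scan: no joined string is ever built. Valid because no
--     # excluded word contains a space, so a match cannot span the separators.
--     for genre in genres_list:
--         g = genre.lower()
--         if any(mot in g for mot in GENRES_EXCLUS):
--             return True
--     return False
-- ===== Notes on version B (the rewrite author's own statement) =====
-- stated objective: alternative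
-- what changed: B drops the ' '.join of the whole list: it scans each genre string individually (lowercasing one element at a time) and returns on the first element containing an excluded word, relying on the fact that no excluded word contains a space so no match can span the join separators.
import Mathlib
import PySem

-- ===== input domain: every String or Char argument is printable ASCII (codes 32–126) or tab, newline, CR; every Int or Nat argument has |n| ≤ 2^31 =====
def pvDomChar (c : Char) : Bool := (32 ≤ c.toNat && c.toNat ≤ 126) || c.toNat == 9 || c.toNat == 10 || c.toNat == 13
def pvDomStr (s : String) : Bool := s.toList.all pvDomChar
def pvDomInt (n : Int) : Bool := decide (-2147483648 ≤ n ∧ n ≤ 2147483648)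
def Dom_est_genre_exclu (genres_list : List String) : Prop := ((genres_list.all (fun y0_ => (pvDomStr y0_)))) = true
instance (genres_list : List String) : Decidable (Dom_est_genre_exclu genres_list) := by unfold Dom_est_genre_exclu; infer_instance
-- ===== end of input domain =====

-- B scans each genre string individually instead of joining the list into one string first;
-- equivalent because no excluded word contains a space (a different decomposition, not faster).


-- module-level constant GENRES_EXCLUS (shared by both Pythons)
def pyGENRES_EXCLUS : List String :=
  ["classical", "orchestra", "symphonic", "chamber", "opera",
   "children", "kids", "baby", "nursery",
   "christmas", "holiday", "noel",
   "compilation", "soundtrack", "anime", "gaming"]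

-- ===== PORT A =====
-- 'if not genres_list: return False'; then joins with ' ', lowercases, and the
-- for-loop with early 'return True' is List.any over the constant word list.
def est_genre_exclu (genres_list : List String) : Bool :=
  if genres_list.isEmpty then false
  else
    let genres_str := PySem.Str.lower (PySem.Str.join " " genres_list)
    pyGENRES_EXCLUS.any (fun genre_exclu => PySem.Str.isIn genre_exclu genres_str)

-- ===== PORT B =====
-- outer loop with early return over the genres, inner any() over the words
def est_genre_exclu_alt (genres_list : List String) : Bool :=
  genres_list.any (fun genre =>
    pyGENRES_EXCLUS.any (fun mot => PySem.Str.isIn mot (PySem.Str.lower genre)))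

-- ===== PRECONDITION & SPEC =====
def Spec_est_genre_exclu (genres_list : List String) (out : Bool) : Prop := out = est_genre_exclu_alt genres_list
instance (genres_list : List String) (out : Bool) : Decidable (Spec_est_genre_exclu genres_list out) := by unfold Spec_est_genre_exclu; infer_instance

-- ===== CLAIM (what is proved, stated in full; the proofs are below) =====
def Claim_equal_est_genre_exclu : Prop := ∀ (genres_list : List String), Dom_est_genre_exclu genres_list → Spec_est_genre_exclu genres_list (est_genre_exclu genres_list)

-- ===== LEMMAS AND PROOFS =====

-- a prefix of u ++ c :: v avoiding c is a prefix of u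
theorem prefix_append_cons_of_not_mem {w u v : List Char} {c : Char}
    (h : w <+: u ++ c :: v) (hc : c ∉ w) : w <+: u := by
  induction w generalizing u with
  | nil => exact List.nil_prefix
  | cons x w' ih =>
    cases u with
    | nil =>
      rcases h with ⟨t, ht⟩
      simp only [List.nil_append, List.cons_append, List.cons.injEq] at ht
      exact absurd (ht.1 ▸ List.mem_cons_self) hc
    | cons y u' =>
      rcases h with ⟨t, ht⟩
      simp only [List.cons_append, List.cons.injEq] at ht
      rcases ht with ⟨rfl, ht⟩
      have h2 : w' <+: u' := ih ⟨t, ht⟩ (fun hm => hc (List.mem_cons_of_mem _ hm))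
      rcases h2 with ⟨t', ht'⟩
      exact ⟨t', by simp [ht']⟩

-- an infix of u ++ c :: v avoiding c lies in u or in v
theorem infix_append_cons_iff {w u v : List Char} {c : Char} (hc : c ∉ w) :
    w <:+: u ++ c :: v ↔ w <:+: u ∨ w <:+: v := by
  constructor
  · intro h
    have h1 : ∃ j, w <+: List.drop j (u ++ c :: v) :=
      (PySem.Chars.exists_prefix_drop_iff_isIn w _).mpr
        ((PySem.Chars.isIn_iff_infix w _).mpr h)
    rcases h1 with ⟨j, hj⟩
    by_cases hle : j ≤ u.length
    · left
      rw [List.drop_append_of_le_length hle] at hj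
      have := prefix_append_cons_of_not_mem hj hc
      exact ((PySem.Chars.isIn_iff_infix w u).mp
        ((PySem.Chars.exists_prefix_drop_iff_isIn w u).mp ⟨j, this⟩))
    · right
      push Not at hle
      have hdrop : List.drop j (u ++ c :: v) = List.drop (j - u.length - 1) v := by
        rw [List.drop_append]
        have h1 : List.drop j u = [] := List.drop_eq_nil_of_le (by omega)
        have h2 : j - u.length = (j - u.length - 1) + 1 := by omega
        rw [h1, h2]
        simp
      rw [hdrop] at hj
      exact ((PySem.Chars.isIn_iff_infix w v).mp
        ((PySem.Chars.exists_prefix_drop_iff_isIn w v).mp ⟨_, hj⟩))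
  · rintro (h | h)
    · exact h.trans (List.prefix_append u (c :: v)).isInfix
    · exact h.trans ((List.suffix_cons c v).trans (List.suffix_append u (c :: v))).isInfix

-- lowercasing commutes with joining on a single space
theorem lower_join_space (css : List (List Char)) :
    PySem.Chars.lower (PySem.Chars.join [' '] css) =
      PySem.Chars.join [' '] (css.map PySem.Chars.lower) := by
  induction css with
  | nil => rfl
  | cons x rest ih =>
    cases rest with
    | nil => simp [PySem.Chars.join_singleton]
    | cons y r =>
      simp only [List.map_cons] at ih ⊢
      rw [PySem.Chars.join_cons_cons, PySem.Chars.join_cons_cons,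
        PySem.Chars.lower, List.map_append, List.map_append, ← PySem.Chars.lower,
        ← PySem.Chars.lower, ← PySem.Chars.lower, ih]
      rfl

-- a space-free word is an infix of the space-join iff it is an infix of some part
theorem infix_join_space_iff {w : List Char} (hw : ' ' ∉ w) :
    ∀ (css : List (List Char)), css ≠ [] →
      (w <:+: PySem.Chars.join [' '] css ↔ ∃ g ∈ css, w <:+: g) := by
  intro css
  induction css with
  | nil => intro h; exact absurd rfl h
  | cons x rest ih =>
    intro _
    cases rest with
    | nil => simp [PySem.Chars.join_singleton]
    | cons y r =>
      rw [PySem.Chars.join_cons_cons]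
      have : x ++ [' '] ++ PySem.Chars.join [' '] (y :: r)
          = x ++ ' ' :: PySem.Chars.join [' '] (y :: r) := by simp
      rw [this, infix_append_cons_iff hw, ih (by simp)]
      simp only [List.mem_cons]
      constructor
      · rintro (h | ⟨g, hg, h⟩)
        · exact ⟨x, Or.inl rfl, h⟩
        · exact ⟨g, Or.inr hg, h⟩
      · rintro ⟨g, (rfl | hg), h⟩
        · exact Or.inl h
        · exact Or.inr ⟨g, hg, h⟩

theorem no_space_in_words : ∀ w ∈ pyGENRES_EXCLUS, ' ' ∉ w.toList := by decide

-- ===== VERDICT (by name: the statement is the Claim_ definition above) =====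
theorem est_genre_exclu_spec : Claim_equal_est_genre_exclu := by
  intro genres_list _
  unfold Spec_est_genre_exclu est_genre_exclu est_genre_exclu_alt
  cases genres_list with
  | nil => rfl
  | cons s rest =>
    simp only [List.isEmpty_cons, Bool.false_eq_true, if_false]
    apply Bool.coe_iff_coe.mp
    simp only [List.any_eq_true, PySem.Str.isIn_iff_infix, PySem.Str.toList_lower,
      PySem.Str.toList_join]
    have hjoin : (" " : String).toList = [' '] := rfl
    rw [hjoin]
    constructor
    · rintro ⟨w, hwmem, hw⟩
      rw [lower_join_space,
        infix_join_space_iff (no_space_in_words w hwmem) _ (by simp)] at hw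
      rcases hw with ⟨g, hg, hwg⟩
      rw [List.map_map, List.mem_map] at hg
      rcases hg with ⟨t, ht, rfl⟩
      exact ⟨t, ht, w, hwmem, hwg⟩
    · rintro ⟨t, ht, w, hwmem, hwg⟩
      refine ⟨w, hwmem, ?_⟩
      rw [lower_join_space,
        infix_join_space_iff (no_space_in_words w hwmem) _ (by simp)]
      exact ⟨PySem.Chars.lower t.toList, by
        rw [List.map_map, List.mem_map]; exact ⟨t, ht, rfl⟩, hwg⟩
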